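-- pv_equiv track=rewrite | github.com/dohui-son/Python-Algorithms | codility/Greedy_MaxNonoverlappingSegments.py | solution
-- ===== SOURCE A (Python) =====
-- def solution(A, B):
--     arr = [sorted([a,b], reverse=True) for a, b in zip(A, B) ]
--     arr.sort()
--     ans, pre = 0, -1
--     for a in arr:
--         if pre < a[1]:
--             ans += 1
--             pre = a[0]
--     return ans
-- ===== SOURCE B (Python) =====
-- def solution(A, B):
--     # sort-free repeated selection: each round scan all segments for the
--     # lexicographically smallest (max, min) pair whose min exceeds the last
--     # chosen endpoint, pick it, and repeat; no sorting pass at all.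
--     segs = [(max(a, b), min(a, b)) for a, b in zip(A, B)]
--     ans, pre = 0, -1
--     for _ in range(len(segs)):
--         best = None
--         for hi, lo in segs:
--             if lo > pre and (best is None or (hi, lo) < best):
--                 best = (hi, lo)
--         if best is None:
--             break
--         ans += 1
--         pre = best[0]
--     return ans
-- ===== Notes on version B (the rewrite author's own statement) =====
-- stated objective: alternative
-- what changed: A normalises the pairs, sorts them lexicographically once and makes a single greedy sweep; B never sorts: it repeatedly scans the unsorted segment list, each round selecting the lexicographically smallest (max,min) pair whose min exceeds the last chosen endpoint, counting one pick per round until none qualifies.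
import Mathlib
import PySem

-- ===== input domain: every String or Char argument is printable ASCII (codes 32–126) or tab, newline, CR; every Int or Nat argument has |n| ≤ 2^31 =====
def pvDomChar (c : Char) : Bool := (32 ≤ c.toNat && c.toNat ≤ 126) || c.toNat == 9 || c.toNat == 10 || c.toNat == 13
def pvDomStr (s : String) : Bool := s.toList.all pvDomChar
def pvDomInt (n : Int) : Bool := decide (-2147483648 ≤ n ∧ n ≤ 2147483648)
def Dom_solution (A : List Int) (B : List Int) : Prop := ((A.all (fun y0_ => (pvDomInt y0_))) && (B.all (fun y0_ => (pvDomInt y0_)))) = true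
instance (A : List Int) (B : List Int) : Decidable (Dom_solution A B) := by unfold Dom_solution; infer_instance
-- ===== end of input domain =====

-- B replaces A's normalise + lexicographic sort + single greedy sweep by a sort-free
-- repeated-selection loop (each round scans the unsorted list for the lex-least eligible
-- (max,min) pair); proved to return the same count on every input.


-- ===== PORT A =====
-- Python's two-element list sorted([a,b], reverse=True) is ported as the pair
-- (max-first, min-second) via the conditional below (exact, including a == b);
-- arr.sort() on those two-element lists is the lexicographic sort PySem.List.sorted2.
def gstep : Int × Int → Int × Int → Int × Int :=
  fun s q => if s.2 < q.2 then (s.1 + 1, q.1) else s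

def solution (A : List Int) (B : List Int) : Int :=
  let arr := (A.zip B).map (fun p => if p.1 < p.2 then (p.2, p.1) else (p.1, p.2))
  let arr2 := PySem.List.sorted2 arr (fun q => q.1) (fun q => q.2)
  (arr2.foldl gstep (0, -1)).1

-- ===== PORT B =====
-- inner scan: Python's 'if lo > pre and (best is None or (hi, lo) < best): best = (hi, lo)'
-- ((hi, lo) < best is Python's lexicographic tuple comparison)
def bestStep (pre : Int) (acc : Option (Int × Int)) (p : Int × Int) : Option (Int × Int) :=
  if pre < p.2 then
    match acc with
    | none => some p
    | some b => if p.1 < b.1 ∨ (p.1 = b.1 ∧ p.2 < b.2) then some p else some b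
  else acc

-- outer loop: 'for _ in range(len(segs))' with early break when no segment qualifies
def selLoop (segs : List (Int × Int)) : Nat → Int × Int → Int
  | 0, s => s.1
  | n + 1, s =>
    match segs.foldl (bestStep s.2) none with
    | none => s.1
    | some b => selLoop segs n (s.1 + 1, b.1)

def solution_alt (A : List Int) (B : List Int) : Int :=
  let segs := (A.zip B).map (fun p => (max p.1 p.2, min p.1 p.2))
  selLoop segs segs.length (0, -1)

-- ===== PRECONDITION & SPEC =====
def Spec_solution (A : List Int) (B : List Int) (out : Int) : Prop := out = solution_alt A B
instance (A : List Int) (B : List Int) (out : Int) : Decidable (Spec_solution A B out) := by unfold Spec_solution; infer_instance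

-- ===== CLAIM (what is proved, stated in full; the proofs are below) =====
def Claim_equal_solution : Prop := ∀ (A : List Int) (B : List Int), Dom_solution A B → Spec_solution A B (solution A B)

-- ===== LEMMAS AND PROOFS =====

-- the (non-strict) lexicographic order on pairs
def LexLe (p q : Int × Int) : Prop := p.1 < q.1 ∨ (p.1 = q.1 ∧ p.2 ≤ q.2)

theorem lexLe_refl (p : Int × Int) : LexLe p p := by unfold LexLe; omega

theorem lexLe_trans {a b c : Int × Int} (h1 : LexLe a b) (h2 : LexLe b c) : LexLe a c := by
  unfold LexLe at *; omega

theorem lexLe_antisymm {a b : Int × Int} (h1 : LexLe a b) (h2 : LexLe b a) : a = b := by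
  obtain ⟨a1, a2⟩ := a; obtain ⟨b1, b2⟩ := b
  unfold LexLe at *; simp only [Prod.mk.injEq]; omega

-- the comparator sorted2 uses on pairs (its 'lt' for key1 = fst, key2 = snd)
def lexLt : Int × Int → Int × Int → Bool :=
  fun a b => decide (a.1 < b.1) || (!decide (b.1 < a.1) && decide (a.2 < b.2))

theorem lexLt_true_le {a b : Int × Int} (h : lexLt a b = true) : LexLe a b := by
  simp only [lexLt, Bool.or_eq_true, Bool.and_eq_true, Bool.not_eq_true',
    decide_eq_true_eq, decide_eq_false_iff_not] at h
  unfold LexLe; omega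

theorem lexLt_false_le {a b : Int × Int} (h : lexLt a b = false) : LexLe b a := by
  simp only [lexLt, Bool.or_eq_false_iff, Bool.and_eq_false_iff, Bool.not_eq_false',
    decide_eq_true_eq, decide_eq_false_iff_not] at h
  unfold LexLe; omega

theorem insertBy_lex_pairwise (x : Int × Int) (ys : List (Int × Int))
    (h : ys.Pairwise LexLe) :
    (PySem.List.insertBy lexLt x ys).Pairwise LexLe := by
  induction ys with
  | nil => simp [PySem.List.insertBy]
  | cons y t ih =>
    rw [PySem.List.insertBy]
    by_cases hxy : lexLt x y = true
    · simp only [hxy, if_true]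
      have hx : LexLe x y := lexLt_true_le hxy
      constructor
      · intro z hz
        rcases List.mem_cons.mp hz with rfl | hz
        · exact hx
        · exact lexLe_trans hx (List.rel_of_pairwise_cons h hz)
      · exact h
    · simp only [hxy]
      have hyx : LexLe y x := lexLt_false_le (by simpa using hxy)
      constructor
      · intro z hz
        rcases (PySem.List.insertBy_mem_iff lexLt x z t).mp hz with rfl | hz
        · exact hyx
        · exact List.rel_of_pairwise_cons h hz
      · exact ih (List.Pairwise.of_cons h)

theorem sorted2_lex_pairwise (xs : List (Int × Int)) :
    (PySem.List.sorted2 xs (fun q => q.1) (fun q => q.2)).Pairwise LexLe := by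
  show (List.foldl _ [] xs).Pairwise _
  have key : ∀ (l : List (Int × Int)) (acc : List (Int × Int)),
      acc.Pairwise LexLe →
      (l.foldl (fun acc x => PySem.List.insertBy lexLt x acc) acc).Pairwise LexLe := by
    intro l
    induction l with
    | nil => intro acc h; exact h
    | cons x t ih => intro acc h; exact ih _ (insertBy_lex_pairwise x acc h)
  exact key xs [] List.Pairwise.nil

-- a run of elements whose lo never exceeds the current endpoint is skipped by the sweep
theorem foldl_gstep_skip (g : List (Int × Int)) :
    ∀ s : Int × Int, (∀ p ∈ g, p.2 ≤ s.2) → g.foldl gstep s = s := by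
  induction g with
  | nil => intro s _; rfl
  | cons x t ih =>
    intro s h
    have hx : x.2 ≤ s.2 := h x (by simp)
    simp only [List.foldl_cons, gstep, if_neg (by omega : ¬ s.2 < x.2)]
    exact ih s (fun p hp => h p (List.mem_cons_of_mem _ hp))

-- picking the lex-least eligible element f and restarting the sweep on the whole
-- sorted list with endpoint f.1 gives the same fold as continuing the sweep
theorem foldl_gstep_pick (l : List (Int × Int)) :
    ∀ (s f : Int × Int), l.Pairwise LexLe → (∀ p ∈ l, p.2 ≤ p.1) →
      f ∈ l → s.2 < f.2 → (∀ p ∈ l, s.2 < p.2 → LexLe f p) →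
      l.foldl gstep s = l.foldl gstep (s.1 + 1, f.1) := by
  induction l with
  | nil => intro s f _ _ hmem _ _; exact absurd hmem (by simp)
  | cons x t ih =>
    intro s f hp hlo hmem hel hmin
    have hff : f.2 ≤ f.1 := hlo f hmem
    by_cases hx : s.2 < x.2
    · have hfx : LexLe f x := hmin x (by simp) hx
      have hxf : LexLe x f := by
        rcases List.mem_cons.mp hmem with rfl | hf
        · exact lexLe_refl f
        · exact List.rel_of_pairwise_cons hp hf
      have hxe : x = f := lexLe_antisymm hxf hfx
      subst hxe
      simp only [List.foldl_cons, gstep, if_pos hx, if_neg (by omega : ¬ (s.1 + 1, x.1).2 < x.2)]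
    · have hft : f ∈ t := by
        rcases List.mem_cons.mp hmem with rfl | hf
        · omega
        · exact hf
      have hsk : ¬ (s.1 + 1, f.1).2 < x.2 := by simp only; omega
      simp only [List.foldl_cons, gstep, if_neg hx, if_neg hsk]
      exact ih s f (List.Pairwise.of_cons hp)
        (fun p hp' => hlo p (List.mem_cons_of_mem _ hp'))
        hft hel (fun p hp' he => hmin p (List.mem_cons_of_mem _ hp') he)

-- full characterisation of B's inner scan: the fold computes the lex-least eligible pair
theorem best_spec (pre : Int) : ∀ (xs : List (Int × Int)) (acc : Option (Int × Int)),
    (∀ a, acc = some a → pre < a.2) →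
    ((xs.foldl (bestStep pre) acc = none → acc = none ∧ ∀ p ∈ xs, ¬ pre < p.2) ∧
     (∀ b, xs.foldl (bestStep pre) acc = some b →
        pre < b.2 ∧ (b ∈ xs ∨ acc = some b) ∧ (∀ p ∈ xs, pre < p.2 → LexLe b p) ∧
        (∀ a, acc = some a → LexLe b a))) := by
  intro xs
  induction xs with
  | nil =>
    intro acc hinv
    refine ⟨fun h => ⟨h, by simp⟩, fun b hb => ?_⟩
    simp only [List.foldl_nil] at hb
    exact ⟨hinv b hb, Or.inr hb, by simp, fun a ha => by rw [hb] at ha; cases ha; exact lexLe_refl _⟩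
  | cons x t ih =>
    intro acc hinv
    simp only [List.foldl_cons]
    by_cases hx : pre < x.2
    · cases hacc : acc with
      | none =>
        have hstep : bestStep pre none x = some x := by
          simp [bestStep, if_pos hx]
        rw [hstep]
        have hinv' : ∀ a, (some x : Option (Int × Int)) = some a → pre < a.2 := by
          intro a ha; cases ha; exact hx
        obtain ⟨ihn, ihs⟩ := ih (some x) hinv'
        refine ⟨fun h => absurd (ihn h).1 (by simp), fun b hb => ?_⟩
        obtain ⟨h1, h2, h3, h4⟩ := ihs b hb
        refine ⟨h1, ?_, ?_, fun a ha => by cases ha⟩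
        · rcases h2 with h2 | h2
          · exact Or.inl (List.mem_cons_of_mem _ h2)
          · cases h2; exact Or.inl (by simp)
        · intro p hp he
          rcases List.mem_cons.mp hp with rfl | hp
          · exact h4 p rfl
          · exact h3 p hp he
      | some a =>
        have ha : pre < a.2 := hinv a hacc
        by_cases hlt : x.1 < a.1 ∨ (x.1 = a.1 ∧ x.2 < a.2)
        · have hstep : bestStep pre (some a) x = some x := by
            simp [bestStep, if_pos hx, if_pos hlt]
          rw [hstep]
          have hxa : LexLe x a := by unfold LexLe; omega
          obtain ⟨ihn, ihs⟩ := ih (some x) (fun c hc => by cases hc; exact hx)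
          refine ⟨fun h => absurd (ihn h).1 (by simp), fun b hb => ?_⟩
          obtain ⟨h1, h2, h3, h4⟩ := ihs b hb
          refine ⟨h1, ?_, ?_, ?_⟩
          · rcases h2 with h2 | h2
            · exact Or.inl (List.mem_cons_of_mem _ h2)
            · cases h2; exact Or.inl (by simp)
          · intro p hp he
            rcases List.mem_cons.mp hp with rfl | hp
            · exact h4 p rfl
            · exact h3 p hp he
          · intro c hc; cases hc
            exact lexLe_trans (h4 x rfl) hxa
        · have hstep : bestStep pre (some a) x = some a := by
            simp only [bestStep, if_pos hx, if_neg hlt]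
          rw [hstep]
          have hax : LexLe a x := by unfold LexLe; unfold LexLe at *; omega
          obtain ⟨ihn, ihs⟩ := ih (some a) (fun c hc => by cases hc; exact ha)
          refine ⟨fun h => absurd (ihn h).1 (by simp), fun b hb => ?_⟩
          obtain ⟨h1, h2, h3, h4⟩ := ihs b hb
          refine ⟨h1, ?_, ?_, ?_⟩
          · rcases h2 with h2 | h2
            · exact Or.inl (List.mem_cons_of_mem _ h2)
            · cases h2; exact Or.inr rfl
          · intro p hp he
            rcases List.mem_cons.mp hp with rfl | hp
            · exact lexLe_trans (h4 a rfl) hax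
            · exact h3 p hp he
          · intro c hc; cases hc; exact h4 _ rfl
    · have hstep : bestStep pre acc x = acc := by
        simp [bestStep, if_neg hx]
      rw [hstep]
      obtain ⟨ihn, ihs⟩ := ih acc hinv
      refine ⟨fun h => ⟨(ihn h).1, ?_⟩, fun b hb => ?_⟩
      · intro p hp
        rcases List.mem_cons.mp hp with rfl | hp
        · exact hx
        · exact (ihn h).2 p hp
      · obtain ⟨h1, h2, h3, h4⟩ := ihs b hb
        refine ⟨h1, ?_, ?_, h4⟩
        · rcases h2 with h2 | h2
          · exact Or.inl (List.mem_cons_of_mem _ h2)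
          · exact Or.inr h2
        · intro p hp he
          rcases List.mem_cons.mp hp with rfl | hp
          · omega
          · exact h3 p hp he

-- strict decrease of the eligible count when one eligible element becomes ineligible
theorem countP_lt_of {α : Type} (p q : α → Bool) : ∀ (l : List α),
    (∀ a ∈ l, p a = true → q a = true) →
    ∀ x ∈ l, q x = true → p x = false → l.countP p < l.countP q := by
  intro l
  induction l with
  | nil => intro _ x hx; exact absurd hx (by simp)
  | cons y t ih =>
    intro hpq x hx hqx hpx
    have hmono : t.countP p ≤ t.countP q :=
      List.countP_mono_left (fun a ha hpa => hpq a (List.mem_cons_of_mem _ ha) hpa)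
    rcases List.mem_cons.mp hx with rfl | hx
    · simp [hqx, hpx]
      omega
    · have := ih (fun a ha hpa => hpq a (List.mem_cons_of_mem _ ha) hpa) x hx hqx hpx
      have hy : p y = true → q y = true := hpq y (by simp)
      simp only [List.countP_cons]
      by_cases hyp : p y = true <;> simp [hyp, hy] <;> omega

-- main equivalence: the selection loop over the unsorted segments equals the
-- greedy sweep over any lex-sorted rearrangement of them
theorem sel_eq_fold (segs l : List (Int × Int)) (hperm : segs.Perm l)
    (hp : l.Pairwise LexLe) (hlo : ∀ p ∈ l, p.2 ≤ p.1) :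
    ∀ (fuel : Nat) (s : Int × Int),
      l.countP (fun p => decide (s.2 < p.2)) ≤ fuel →
      selLoop segs fuel s = (l.foldl gstep s).1 := by
  intro fuel
  induction fuel with
  | zero =>
    intro s hc
    have h0 : l.countP (fun p => decide (s.2 < p.2)) = 0 := Nat.le_zero.mp hc
    have hno : ∀ p ∈ l, ¬ s.2 < p.2 := by
      intro p hp'
      have := List.countP_eq_zero.mp h0 p hp'
      simpa using this
    rw [foldl_gstep_skip l s (fun p hp' => by have := hno p hp'; omega)]
    rfl
  | succ n ih =>
    intro s hc
    show (match segs.foldl (bestStep s.2) none with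
          | none => s.1
          | some b => selLoop segs n (s.1 + 1, b.1)) = (l.foldl gstep s).1
    obtain ⟨bn, bs⟩ := best_spec s.2 segs none (by intro a ha; cases ha)
    cases hr : segs.foldl (bestStep s.2) none with
    | none =>
      have hno := (bn hr).2
      rw [foldl_gstep_skip l s (fun p hp' => by
        have := hno p (hperm.mem_iff.mpr hp'); omega)]
    | some f =>
      obtain ⟨hel, hmem, hmin, _⟩ := bs f hr
      have hfl : f ∈ l := by
        rcases hmem with hm | hm
        · exact hperm.mem_iff.mp hm
        · cases hm
      have hminl : ∀ p ∈ l, s.2 < p.2 → LexLe f p :=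
        fun p hp' he => hmin p (hperm.mem_iff.mpr hp') he
      have hpick := foldl_gstep_pick l s f hp hlo hfl hel hminl
      have hf1 : f.2 ≤ f.1 := hlo f hfl
      have hcdec : l.countP (fun p => decide ((s.1 + 1, f.1).2 < p.2))
          < l.countP (fun p => decide (s.2 < p.2)) := by
        apply countP_lt_of _ _ l ?_ f hfl (by simpa using hel) (by simp only [decide_eq_false_iff_not]; omega)
        intro a _ hpa
        simp only [decide_eq_true_eq] at *
        omega
      rw [hpick]
      exact ih (s.1 + 1, f.1) (by omega)

-- ===== VERDICT (by name: the statement is the Claim_ definition above) =====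
theorem solution_spec : Claim_equal_solution := by
  intro A B _
  unfold Spec_solution solution solution_alt
  simp only
  have hmap : (A.zip B).map (fun p : Int × Int => if p.1 < p.2 then (p.2, p.1) else (p.1, p.2))
      = (A.zip B).map (fun p : Int × Int => (max p.1 p.2, min p.1 p.2)) := by
    apply List.map_congr_left
    intro p _
    by_cases h : p.1 < p.2
    · rw [if_pos h, max_eq_right (le_of_lt h), min_eq_left (le_of_lt h)]
    · rw [if_neg h, max_eq_left (by omega), min_eq_right (by omega)]
  rw [hmap]
  set segs : List (Int × Int) := (A.zip B).map (fun p => (max p.1 p.2, min p.1 p.2)) with hsegs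
  set l : List (Int × Int) := PySem.List.sorted2 segs (fun q => q.1) (fun q => q.2) with hl
  have hperm : segs.Perm l := (PySem.List.sorted2_perm segs _ _ false).symm
  have hp : l.Pairwise LexLe := sorted2_lex_pairwise segs
  have hlo : ∀ p ∈ l, p.2 ≤ p.1 := by
    intro p hp'
    have : p ∈ segs := hperm.mem_iff.mpr hp'
    obtain ⟨u, _, rfl⟩ := List.mem_map.mp this
    simp
  have hfuel : l.countP (fun p => decide (((0 : Int), (-1 : Int)).2 < p.2)) ≤ segs.length := by
    calc l.countP _ ≤ l.length := List.countP_le_length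
    _ = segs.length := (hperm.length_eq).symm
  exact (sel_eq_fold segs l hperm hp hlo segs.length (0, -1) hfuel).symm
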